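-- pv_equiv track=rewrite | github.com/LinusCDE/AdventOfCode-2017 | puzzle4.py | phrase_valid
-- ===== SOURCE A (Python) =====
-- POLICY_NO_DUPLICATES = 0
--
-- POLICY_NO_ANAGRAMS = 1
--
-- def phrase_valid(phrase, policies):
--     '''Ckecks if the given phrase satisfies all given policies'''
--     words = []  # Will contain already found words
--     for word in phrase.split(' '):
--         if POLICY_NO_ANAGRAMS in policies:
--             word = str().join(sorted(word))  # Sorts all letters alphabetically
--         if word in words and POLICY_NO_DUPLICATES in policies:
--             return False  # Word was already found
--         words.append(word)
--     return True
-- ===== SOURCE B (Python) =====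
-- POLICY_NO_DUPLICATES = 0
--
-- POLICY_NO_ANAGRAMS = 1
--
-- def phrase_valid(phrase, policies):
--     '''Ckecks if the given phrase satisfies all given policies'''
--     words = phrase.split(' ')
--     if POLICY_NO_ANAGRAMS in policies:
--         words = [''.join(sorted(w)) for w in words]
--     if POLICY_NO_DUPLICATES in policies:
--         return len(words) == len(set(words))
--     return True
-- ===== Notes on version B (the rewrite author's own statement) =====
-- stated objective: simpler
-- what changed: Replaces the incremental seen-list scan with early return by normalizing all words up front and deciding validity with a single len(words)==len(set(words)) cardinality test gated on the duplicate policy.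
import Mathlib
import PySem

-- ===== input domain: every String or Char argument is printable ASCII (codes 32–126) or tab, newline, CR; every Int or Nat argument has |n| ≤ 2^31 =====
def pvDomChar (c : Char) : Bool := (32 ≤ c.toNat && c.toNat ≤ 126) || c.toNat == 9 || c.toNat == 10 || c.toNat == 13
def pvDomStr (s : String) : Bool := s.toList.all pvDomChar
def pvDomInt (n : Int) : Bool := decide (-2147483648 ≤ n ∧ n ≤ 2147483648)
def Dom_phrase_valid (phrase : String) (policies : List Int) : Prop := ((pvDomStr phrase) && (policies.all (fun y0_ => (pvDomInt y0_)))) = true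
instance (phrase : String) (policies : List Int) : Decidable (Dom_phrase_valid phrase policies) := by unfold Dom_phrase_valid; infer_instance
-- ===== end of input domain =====

-- B replaces A's incremental seen-list scan (with early return) by normalizing all
-- words up front and deciding validity with one len(words) == len(set(words))
-- cardinality test gated on the duplicate policy; objective: simpler.

-- ===== PORT A =====
-- ''.join(sorted(word)) — shared normalization helper, used verbatim by both Pythons
def pvSortWord (w : String) : String := String.ofList (PySem.List.sorted w.toList (fun c => c) false)

-- A's for-loop over the words, carrying the 'words' accumulator; early return = returning false
def phraseValidLoop (policies : List Int) : List String → List String → Bool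
  | [], _ => true
  | w :: rest, words =>
    let w' := if policies.contains (1 : Int) then pvSortWord w else w
    if words.contains w' && policies.contains (0 : Int) then false
    else phraseValidLoop policies rest (words ++ [w'])

def phrase_valid (phrase : String) (policies : List Int) : Bool :=
  phraseValidLoop policies ((PySem.Str.split? phrase " ").getD []) []

-- ===== PORT B =====
def phrase_valid_alt (phrase : String) (policies : List Int) : Bool :=
  let words := (PySem.Str.split? phrase " ").getD []
  let words := if policies.contains (1 : Int) then words.map pvSortWord else words
  if policies.contains (0 : Int) then
    decide ((words.length : Int) = PySem.Set.len (PySem.Set.ofList words))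
  else true

-- ===== PRECONDITION & SPEC =====
def Spec_phrase_valid (phrase : String) (policies : List Int) (out : Bool) : Prop := out = phrase_valid_alt phrase policies
instance (phrase : String) (policies : List Int) (out : Bool) : Decidable (Spec_phrase_valid phrase policies out) := by unfold Spec_phrase_valid; infer_instance

-- ===== CLAIM (what is proved, stated in full; the proofs are below) =====
def Claim_equal_phrase_valid : Prop := ∀ (phrase : String) (policies : List Int), Dom_phrase_valid phrase policies → Spec_phrase_valid phrase policies (phrase_valid phrase policies)

-- ===== LEMMAS AND PROOFS =====

-- Without the no-duplicates policy, A's loop never returns early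
theorem loop_no_dup (policies : List Int) (h : (0 : Int) ∉ policies) :
    ∀ (ws acc : List String), phraseValidLoop policies ws acc = true := by
  intro ws
  induction ws with
  | nil => intro acc; simp [phraseValidLoop]
  | cons w rest ih => intro acc; simp [phraseValidLoop, h, ih]

-- |set(l)| = |l| iff l has no duplicates
theorem len_ofList_eq_iff (l : List String) :
    ((PySem.Set.ofList l).length = l.length) ↔ l.Nodup := by
  induction l using List.reverseRecOn with
  | nil => simp [PySem.Set.ofList]
  | append_singleton xs x ih =>
    rw [PySem.Set.ofList_append_singleton]
    unfold PySem.Set.add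
    by_cases hx : x ∈ PySem.Set.ofList xs
    · have hxs : x ∈ xs := (PySem.Set.mem_ofList xs x).mp hx
      have hle := PySem.Set.length_ofList_le xs
      rw [if_pos ((PySem.Set.contains_iff _ x).mpr hx)]
      constructor
      · intro hlen
        exfalso
        rw [List.length_append, List.length_singleton] at hlen
        omega
      · intro hnd
        exfalso
        rw [List.nodup_append] at hnd
        exact hnd.2.2 x hxs x (by simp) rfl
    · have hxs : x ∉ xs := fun hm => hx ((PySem.Set.mem_ofList xs x).mpr hm)
      have hc : (PySem.Set.ofList xs).contains x = false := by
        rw [Bool.eq_false_iff]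
        intro hcon
        exact hx ((PySem.Set.contains_iff _ x).mp hcon)
      rw [if_neg (fun hcon => hx ((PySem.Set.contains_iff _ x).mp hcon))]
      rw [List.length_append, List.length_append, List.nodup_append]
      constructor
      · intro hlen
        have hx' : (PySem.Set.ofList xs).length = xs.length := by omega
        refine ⟨ih.mp hx', List.nodup_singleton _, ?_⟩
        intro a ha b hb
        simp only [List.mem_singleton] at hb
        subst hb
        exact fun heq => hxs (heq ▸ ha)
      · intro ⟨hnd, _, _⟩
        rw [ih.mpr hnd]

-- With the no-duplicates policy, A's loop decides Nodup of acc ++ the normalized words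
theorem loop_dup (policies : List Int) (h : (0 : Int) ∈ policies) :
    ∀ (ws acc : List String), acc.Nodup →
      phraseValidLoop policies ws acc =
        decide ((acc ++ ws.map (fun w => if policies.contains (1 : Int) then pvSortWord w else w)).Nodup) := by
  have h0 : policies.contains (0 : Int) = true := by simpa using h
  intro ws
  induction ws with
  | nil => intro acc hacc; simp [phraseValidLoop, hacc]
  | cons w rest ih =>
    intro acc hacc
    simp only [phraseValidLoop, List.map_cons]
    by_cases hmem : acc.contains (if policies.contains (1 : Int) then pvSortWord w else w) = true
    · rw [if_pos (by rw [hmem, h0]; rfl)]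
      have hmx : (if policies.contains (1 : Int) then pvSortWord w else w) ∈ acc := by
        simpa using hmem
      symm
      rw [decide_eq_false_iff_not, List.nodup_append]
      intro hnd
      exact hnd.2.2 _ hmx _ (by simp) rfl
    · have hmx : (if policies.contains (1 : Int) then pvSortWord w else w) ∉ acc := by
        simpa using hmem
      rw [if_neg (fun hcond => hmem ((Bool.and_eq_true _ _).mp hcond).1)]
      have hacc' : (acc ++ [if policies.contains (1 : Int) then pvSortWord w else w]).Nodup := by
        rw [List.nodup_append]
        refine ⟨hacc, List.nodup_singleton _, ?_⟩
        intro a ha b hb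
        simp only [List.mem_singleton] at hb
        subst hb
        exact fun heq => hmx (heq ▸ ha)
      rw [ih _ hacc']
      rw [List.append_assoc, List.singleton_append]
      congr 1

-- B's cardinality test decides Nodup
theorem decide_card (l : List String) :
    decide ((l.length : Int) = PySem.Set.len (PySem.Set.ofList l)) = decide l.Nodup := by
  rw [decide_eq_decide]
  simp only [PySem.Set.len, Int.natCast_inj]
  rw [eq_comm]
  exact len_ofList_eq_iff l

-- ===== VERDICT (by name: the statement is the Claim_ definition above) =====
theorem phrase_valid_spec : Claim_equal_phrase_valid := by
  intro phrase policies _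
  unfold Spec_phrase_valid phrase_valid phrase_valid_alt
  by_cases hd : (0 : Int) ∈ policies
  · have h0 : policies.contains (0 : Int) = true := by simpa using hd
    rw [loop_dup policies hd _ [] List.nodup_nil, List.nil_append]
    by_cases ha : policies.contains (1 : Int) = true
    · simp only [ha, if_true, h0]
      rw [decide_card]
    · have ha' : policies.contains (1 : Int) = false := by
        revert ha; cases policies.contains (1 : Int) <;> simp
      simp only [ha', Bool.false_eq_true, if_false, h0, if_true]
      rw [decide_card]
      simp
  · have h0 : policies.contains (0 : Int) = false := by simpa using hd
    rw [loop_no_dup policies hd]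
    simp only [h0, Bool.false_eq_true, if_false]
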